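-- pv_equiv track=rewrite | github.com/ooblog/LTsv10kanedit | LTsv/LTsv_file.py | LTsv_unzipdata
-- ===== SOURCE A (Python) =====
-- def LTsv_joindatanum(LTsv_line,LTsv_datanum,LTsv_default=None):
--     LTsv_data="" if LTsv_default is None else LTsv_default.replace('\n','\t')
--     if len(LTsv_data) > 0:
--         if not LTsv_data.startswith('\t'):
--             LTsv_data='\t'+LTsv_data
--     LTsv_datadeno=0; LTsv_splits=LTsv_line.replace('\n','\t').split('\t'); LTsv_join=""
--     if LTsv_datanum < 0:
--         LTsv_join+=LTsv_data
--     for LTsv_split in LTsv_splits: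
--         if len(LTsv_split) > 0:
--             if LTsv_datanum == LTsv_datadeno:
--                 LTsv_join+=LTsv_data
--             LTsv_join+='\t'+LTsv_split
--             LTsv_datadeno+=1
--     if LTsv_datadeno <= LTsv_datanum:
--         LTsv_join+=LTsv_data
--     return LTsv_join.strip('\t')
--
-- def LTsv_unzipdata(LTsv_line):
--     LTsv_datas=""
--     LTsv_splitlabels=LTsv_joindatanum(LTsv_line,0,"").strip('\n').split('\t')
--     for LTsv_split in LTsv_splitlabels:
--         if len(LTsv_split) > 0:
--             LTsv_posL=LTsv_split.find(':')
--             if LTsv_posL > 0: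
--                 LTsv_data=LTsv_split[LTsv_posL+len('\t'):]
--                 if len(LTsv_data) > 0:
--                     LTsv_datas+=LTsv_data+'\t'
--     return LTsv_datas.rstrip('\t')
-- ===== SOURCE B (Python) =====
-- def LTsv_unzipdata(LTsv_line):
--     # character-level state machine: one scan over the characters, no split/find/slice
--     out = []
--     before = 0      # chars seen in the current field before the first ':'
--     seen = False    # has the current field shown a ':' yet?
--     val = []        # chars after the first ':'
--     for c in LTsv_line + '\t':          # trailing sentinel separator flushes the last field
--         if c == '\t' or c == '\n':
--             if seen and before > 0 and val:
--                 out.append(''.join(val))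
--             before = 0; seen = False; val = []
--         elif not seen:
--             if c == ':':
--                 seen = True
--             else:
--                 before += 1
--         else:
--             val.append(c)
--     return '\t'.join(out)
-- ===== Notes on version B (the rewrite author's own statement) =====
-- stated objective: alternative
-- what changed: B replaces A's normalize-join-strip-resplit string pipeline (helper with a counting loop, then find/slice per field) by a single character-level state machine that scans the line once, tracking per-field state (chars before the first ':', colon seen, value buffer) and flushing at each separator.
import Mathlib
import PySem

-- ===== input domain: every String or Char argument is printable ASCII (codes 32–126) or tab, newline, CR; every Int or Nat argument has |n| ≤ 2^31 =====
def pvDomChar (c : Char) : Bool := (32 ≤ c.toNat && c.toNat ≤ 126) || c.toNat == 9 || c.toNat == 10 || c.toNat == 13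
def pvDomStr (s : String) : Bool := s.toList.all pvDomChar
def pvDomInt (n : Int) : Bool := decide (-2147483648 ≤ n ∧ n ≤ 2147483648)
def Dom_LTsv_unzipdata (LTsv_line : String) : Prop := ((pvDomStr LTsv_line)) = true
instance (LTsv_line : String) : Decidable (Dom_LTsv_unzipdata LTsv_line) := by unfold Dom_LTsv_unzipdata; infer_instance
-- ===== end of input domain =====

-- B replaces A's normalize-join-strip-resplit pipeline (helper with a counting loop, then
-- find/slice per split field) by a single character-level state machine scanning the line once.
-- ===== PORT A =====
-- helper LTsv_joindatanum ported faithfully (strings handled on List Char via PySem.Chars)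
def LTsv_joindatanum (LTsv_line : String) (LTsv_datanum : Int) (LTsv_default : Option String) : String :=
  let LTsv_data : List Char :=
    match LTsv_default with
    | none => []
    | some d => PySem.Chars.replace d.toList ['\n'] ['\t']
  let LTsv_data : List Char :=
    if LTsv_data.length > 0 then
      if ¬ PySem.Chars.startswith LTsv_data ['\t'] then '\t' :: LTsv_data else LTsv_data
    else LTsv_data
  let LTsv_splits := PySem.Chars.splitOn (PySem.Chars.replace LTsv_line.toList ['\n'] ['\t']) ['\t']
  let LTsv_join : List Char := if LTsv_datanum < 0 then LTsv_data else []
  let st : Int × List Char :=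
    LTsv_splits.foldl (fun st LTsv_split =>
      if LTsv_split.length > 0 then
        let j := if LTsv_datanum == st.1 then st.2 ++ LTsv_data else st.2
        (st.1 + 1, j ++ '\t' :: LTsv_split)
      else st) (0, LTsv_join)
  let LTsv_join := if st.1 ≤ LTsv_datanum then st.2 ++ LTsv_data else st.2
  String.ofList (PySem.Chars.stripChars LTsv_join ['\t'])

def LTsv_unzipdata (LTsv_line : String) : String :=
  let LTsv_splitlabels :=
    PySem.Chars.splitOn
      (PySem.Chars.stripChars (LTsv_joindatanum LTsv_line 0 (some "")).toList ['\n']) ['\t']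
  let LTsv_datas : List Char :=
    LTsv_splitlabels.foldl (fun acc LTsv_split =>
      if LTsv_split.length > 0 then
        let LTsv_posL := PySem.Chars.find LTsv_split [':']
        if LTsv_posL > 0 then
          let LTsv_data := PySem.Chars.slice LTsv_split (some (LTsv_posL + 1)) none
          if LTsv_data.length > 0 then acc ++ LTsv_data ++ ['\t'] else acc
        else acc
      else acc) []
  -- '…'.rstrip('\t') ported by hand (PySem has no rstrip-with-chars): drop trailing tabs; exact
  String.ofList ((LTsv_datas.reverse.dropWhile (fun c => c == '\t')).reverse)

-- ===== PORT B =====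
-- the loop body of Source B's for-loop, as a named step function over the state
-- (out, before, seen, val); list append / string join as in Source B
def pvStepB (st : List (List Char) × Int × Bool × List Char) (c : Char) :
    List (List Char) × Int × Bool × List Char :=
  if c = '\t' ∨ c = '\n' then
    (if st.2.2.1 ∧ st.2.1 > 0 ∧ st.2.2.2 ≠ [] then st.1 ++ [st.2.2.2] else st.1, 0, false, [])
  else if ¬ st.2.2.1 then
    if c = ':' then (st.1, st.2.1, true, st.2.2.2)
    else (st.1, st.2.1 + 1, st.2.2.1, st.2.2.2)
  else (st.1, st.2.1, st.2.2.1, st.2.2.2 ++ [c])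

def LTsv_unzipdata_alt (LTsv_line : String) : String :=
  String.ofList (PySem.Chars.join ['\t']
    ((LTsv_line.toList ++ ['\t']).foldl pvStepB ([], 0, false, [])).1)

-- ===== PRECONDITION & SPEC =====
def Spec_LTsv_unzipdata (LTsv_line : String) (out : String) : Prop := out = LTsv_unzipdata_alt LTsv_line
instance (LTsv_line : String) (out : String) : Decidable (Spec_LTsv_unzipdata LTsv_line out) := by unfold Spec_LTsv_unzipdata; infer_instance

-- ===== CLAIM (what is proved, stated in full; the proofs are below) =====
def Claim_equal_LTsv_unzipdata : Prop := ∀ (LTsv_line : String), Dom_LTsv_unzipdata LTsv_line → Spec_LTsv_unzipdata LTsv_line (LTsv_unzipdata LTsv_line)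

-- ===== LEMMAS AND PROOFS =====

-- ---- proof-side canonical forms ----

-- pointwise '\n' → '\t' replacement
def pvSub (c : Char) : Char := if c = '\n' then '\t' else c

-- split on '\t' as (first piece, remaining pieces)
def pvSplitC : List Char → List Char × List (List Char)
  | [] => ([], [])
  | c :: rest =>
    let r := pvSplitC rest
    if c = '\t' then ([], r.1 :: r.2) else (c :: r.1, r.2)

-- '\t'.join
def pvIc : List (List Char) → List Char
  | [] => []
  | [v] => v
  | v :: vs => v ++ '\t' :: pvIc vs

-- value extracted from one field (A's guard structure: find/slice)
def pvG (sp : List Char) : Option (List Char) :=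
  if sp.length > 0 then
    if PySem.Chars.find sp [':'] > 0 then
      if (PySem.Chars.slice sp (some (PySem.Chars.find sp [':'] + 1)) none).length > 0 then
        some (PySem.Chars.slice sp (some (PySem.Chars.find sp [':'] + 1)) none)
      else none
    else none
  else none

def pvFlatL (vs : List (List Char)) : List Char := (vs.map (fun v => '\t' :: v)).flatten
def pvFlatR (vs : List (List Char)) : List Char := (vs.map (fun v => v ++ ['\t'])).flatten

-- ---- primitive characterisations ----

theorem pvReplace_go (s : List Char) : ∀ (fuel : Nat) (acc : List Char), s.length ≤ fuel →
    PySem.Chars.replace.go ['\n'] ['\t'] fuel s acc = acc.reverse ++ s.map pvSub := by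
  induction s with
  | nil => intro fuel acc _; cases fuel <;> simp [PySem.Chars.replace.go]
  | cons c rest ih =>
    intro fuel acc h
    cases fuel with
    | zero => simp at h
    | succ f =>
      simp only [List.length_cons] at h
      by_cases hc : c = '\n'
      · subst hc
        simp [PySem.Chars.replace.go, List.isPrefixOf, ih f _ (by omega), pvSub]
      · simp [PySem.Chars.replace.go, List.isPrefixOf, hc, ih f _ (by omega), pvSub, Ne.symm hc]

theorem pvReplace_eq (s : List Char) :
    PySem.Chars.replace s ['\n'] ['\t'] = s.map pvSub := by
  simp [PySem.Chars.replace, pvReplace_go s s.length [] le_rfl]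

theorem pvSplit_go (s : List Char) : ∀ (fuel : Nat) (cur : List Char) (acc : List (List Char)),
    s.length ≤ fuel →
    PySem.Chars.splitOn.go ['\t'] fuel s cur acc
      = acc.reverse ++ (cur.reverse ++ (pvSplitC s).1) :: (pvSplitC s).2 := by
  induction s with
  | nil => intro fuel cur acc _; cases fuel <;> simp [PySem.Chars.splitOn.go, pvSplitC]
  | cons c rest ih =>
    intro fuel cur acc h
    cases fuel with
    | zero => simp at h
    | succ f =>
      simp only [List.length_cons] at h
      by_cases hc : c = '\t'
      · subst hc
        simp [PySem.Chars.splitOn.go, List.isPrefixOf, ih f [] _ (by omega), pvSplitC]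
      · simp [PySem.Chars.splitOn.go, List.isPrefixOf, hc, Ne.symm hc,
          ih f (c :: cur) acc (by omega), pvSplitC]

theorem pvSplitOn_eq (s : List Char) :
    PySem.Chars.splitOn s ['\t'] = (pvSplitC s).1 :: (pvSplitC s).2 := by
  simp [PySem.Chars.splitOn, pvSplit_go s (s.length + 1) [] [] (by omega)]

-- ---- pieces of the split ----

theorem pvSplitC_no_tab (s : List Char) :
    '\t' ∉ (pvSplitC s).1 ∧ ∀ p ∈ (pvSplitC s).2, '\t' ∉ p := by
  induction s with
  | nil => simp [pvSplitC]
  | cons c rest ih =>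
    by_cases hc : c = '\t' <;> simp_all [pvSplitC, hc] <;> tauto

theorem pvSplitC_mem (s : List Char) :
    (∀ c ∈ (pvSplitC s).1, c ∈ s) ∧ ∀ p ∈ (pvSplitC s).2, ∀ c ∈ p, c ∈ s := by
  induction s with
  | nil => simp [pvSplitC]
  | cons c rest ih =>
    by_cases hc : c = '\t' <;> simp_all [pvSplitC, hc] <;>
      exact fun p hp x hx => Or.inr (ih.2 p hp x hx)

-- ---- roundtrip split (join parts) = parts ----

theorem pvSplitC_self (p : List Char) (hp : '\t' ∉ p) : pvSplitC p = (p, []) := by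
  induction p with
  | nil => rfl
  | cons c rest ih =>
    simp only [List.mem_cons, not_or] at hp
    simp [pvSplitC, ih hp.2, Ne.symm hp.1]

theorem pvSplitC_append (p : List Char) (hp : '\t' ∉ p) (rest : List Char) :
    pvSplitC (p ++ '\t' :: rest) = (p, (pvSplitC rest).1 :: (pvSplitC rest).2) := by
  induction p with
  | nil => simp [pvSplitC]
  | cons c q ih =>
    simp only [List.mem_cons, not_or] at hp
    simp [pvSplitC, ih hp.2, Ne.symm hp.1]

theorem pvSplitC_ic (vs : List (List Char)) (h0 : vs ≠ []) (h : ∀ p ∈ vs, '\t' ∉ p) :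
    (pvSplitC (pvIc vs)).1 :: (pvSplitC (pvIc vs)).2 = vs := by
  induction vs with
  | nil => simp at h0
  | cons v vs ih =>
    cases vs with
    | nil => simp [pvIc, pvSplitC_self v (h v (by simp))]
    | cons w ws =>
      have hrec := ih (by simp) (fun p hp => h p (by simp [hp]))
      simp only [pvIc] at hrec ⊢
      rw [pvSplitC_append v (h v (by simp))]
      simpa using hrec

theorem pvJoin_eq_ic (vs : List (List Char)) : PySem.Chars.join ['\t'] vs = pvIc vs := by
  induction vs with
  | nil => simp [PySem.Chars.join, List.intercalate, pvIc]
  | cons v vs ih =>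
    cases vs with
    | nil => simp [PySem.Chars.join, List.intercalate, pvIc]
    | cons w ws =>
      simp only [PySem.Chars.join, List.intercalate, List.intersperse, List.flatten] at ih ⊢
      simp [pvIc, ← ih]

-- ---- strip lemmas ----

theorem pvDropWhile_id (p : Char → Bool) (l : List Char) (h : ∀ c ∈ l, p c = false) :
    l.dropWhile p = l := by
  cases l with
  | nil => rfl
  | cons c t => rw [List.dropWhile_cons_of_neg (by simp [h c List.mem_cons_self])]

theorem pvStrip_id (s : List Char) (h : ∀ c ∈ s, c ≠ '\n') :
    PySem.Chars.stripChars s ['\n'] = s := by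
  simp only [PySem.Chars.stripChars, List.contains_cons, List.contains_nil]
  rw [pvDropWhile_id _ s (by intro c hc; simpa using h c hc),
    pvDropWhile_id _ s.reverse (by intro c hc; simpa using h c (List.mem_reverse.mp hc))]
  simp

theorem pvLastc (vs : List (List Char)) (h0 : vs ≠ []) (h : ∀ p ∈ vs, p ≠ [] ∧ '\t' ∉ p) :
    ∃ c r, (pvIc vs).reverse = c :: r ∧ c ≠ '\t' := by
  induction vs with
  | nil => simp at h0
  | cons v vs ih =>
    cases vs with
    | nil =>
      obtain ⟨hv, hvt⟩ := h v (by simp)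
      obtain ⟨c, r, hcr⟩ := List.exists_cons_of_ne_nil (by simpa using hv : v.reverse ≠ [])
      exact ⟨c, r, by simpa [pvIc] using hcr, fun hc => hvt (by
        have : c ∈ v.reverse := by simp [hcr]
        simpa [hc] using List.mem_reverse.mp this)⟩
    | cons w ws =>
      obtain ⟨c, r, hcr, hct⟩ := ih (by simp) (fun p hp => h p (by simp [hp]))
      refine ⟨c, r ++ '\t' :: v.reverse, ?_, hct⟩
      simp only [pvIc] at hcr ⊢
      simp [List.reverse_append, hcr]

theorem pvFlatL_eq (p : List Char) (ps : List (List Char)) :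
    p ++ pvFlatL ps = pvIc (p :: ps) := by
  induction ps generalizing p with
  | nil => simp [pvFlatL, pvIc]
  | cons q qs ih =>
    simp only [pvFlatL, List.map_cons, List.flatten_cons, pvIc] at ih ⊢
    cases qs <;> simp_all [pvIc, pvFlatL] <;> simp [← ih q]

theorem pvStripTab_flat (nf : List (List Char)) (h : ∀ p ∈ nf, p ≠ [] ∧ '\t' ∉ p) :
    PySem.Chars.stripChars (pvFlatL nf) ['\t'] = pvIc nf := by
  cases nf with
  | nil => simp [pvFlatL, PySem.Chars.stripChars, pvIc]
  | cons p ps =>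
    obtain ⟨hp, hpt⟩ := h p (by simp)
    obtain ⟨c, q, hcq⟩ := List.exists_cons_of_ne_nil hp
    have hct : c ≠ '\t' := fun hc => hpt (by simp [hcq, hc])
    obtain ⟨d, r, hdr, hdt⟩ := pvLastc (p :: ps) (by simp) h
    obtain ⟨tl, htl⟩ : ∃ tl, pvIc (p :: ps) = c :: tl := by
      cases ps with
      | nil => exact ⟨q, by simp [pvIc, hcq]⟩
      | cons w ws => exact ⟨q ++ '\t' :: pvIc (w :: ws), by simp [pvIc, hcq]⟩
    have h1 : pvFlatL (p :: ps) = '\t' :: (p ++ pvFlatL ps) := by simp [pvFlatL]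
    rw [PySem.Chars.stripChars, h1, pvFlatL_eq p ps,
      List.dropWhile_cons_of_pos (by simp), htl,
      List.dropWhile_cons_of_neg (by simp [hct]), ← htl, hdr,
      List.dropWhile_cons_of_neg (by simp [hdt]), ← hdr, List.reverse_reverse]

theorem pvFlatR_eq (vs : List (List Char)) (h0 : vs ≠ []) :
    pvFlatR vs = pvIc vs ++ ['\t'] := by
  induction vs with
  | nil => simp at h0
  | cons v vs ih =>
    cases vs with
    | nil => simp [pvFlatR, pvIc]
    | cons w ws => simp [pvFlatR, pvIc] at ih ⊢; simp [ih]

theorem pvRstrip_flatR (vs : List (List Char)) (h : ∀ v ∈ vs, v ≠ [] ∧ '\t' ∉ v) :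
    ((pvFlatR vs).reverse.dropWhile (fun c => c == '\t')).reverse = pvIc vs := by
  cases vs with
  | nil => simp [pvFlatR, pvIc]
  | cons v vs =>
    obtain ⟨d, r, hdr, hdt⟩ := pvLastc (v :: vs) (by simp) h
    rw [pvFlatR_eq _ (by simp), List.reverse_append]
    simp only [List.reverse_cons, List.reverse_nil, List.nil_append, List.singleton_append]
    rw [List.dropWhile_cons_of_pos (by simp), hdr,
      List.dropWhile_cons_of_neg (by simp [hdt]), ← hdr, List.reverse_reverse]

-- ---- A-side folds ----

theorem pvFoldA1 (fs : List (List Char)) : ∀ (acc : List Char) (n : Int),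
    (fs.foldl (fun st sp =>
        if sp.length > 0 then ((st.1 + 1 : Int), st.2 ++ '\t' :: sp) else st) (n, acc)).2
      = acc ++ pvFlatL (fs.filter (fun p => p.length > 0)) := by
  induction fs with
  | nil => intro acc n; simp [pvFlatL]
  | cons f fs ih =>
    intro acc n
    simp only [List.foldl_cons]
    by_cases hf : f.length > 0
    · rw [if_pos hf, ih]
      simp [List.filter_cons, hf, pvFlatL]
    · rw [if_neg hf, ih]
      simp [List.filter_cons, hf]

theorem pvFoldA2 (fs : List (List Char)) : ∀ (acc : List Char),
    fs.foldl (fun acc sp =>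
        if sp.length > 0 then
          let pos := PySem.Chars.find sp [':']
          if pos > 0 then
            let v := PySem.Chars.slice sp (some (pos + 1)) none
            if v.length > 0 then acc ++ v ++ ['\t'] else acc
          else acc
        else acc) acc
      = acc ++ pvFlatR (fs.filterMap pvG) := by
  induction fs with
  | nil => intro acc; simp [pvFlatR]
  | cons f fs ih =>
    intro acc
    simp only [List.foldl_cons]
    rw [ih, List.filterMap_cons]
    by_cases h1 : f.length > 0
    · by_cases h2 : PySem.Chars.find f [':'] > 0
      · by_cases h3 : (PySem.Chars.slice f (some (PySem.Chars.find f [':'] + 1)) none).length > 0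
        · have hg : pvG f = some (PySem.Chars.slice f (some (PySem.Chars.find f [':'] + 1)) none) := by
            rw [pvG, if_pos h1, if_pos h2, if_pos h3]
          have h3' := h3; rw [PySem.Chars.slice_eq_listSlice] at h3'
          simp [hg, h1, h2, h3', pvFlatR]
        · have hg : pvG f = none := by rw [pvG, if_pos h1, if_pos h2, if_neg h3]
          have h3' := h3; rw [PySem.Chars.slice_eq_listSlice] at h3'
          simp [hg, h1, h2, h3']
      · have hg : pvG f = none := by rw [pvG, if_pos h1, if_neg h2]
        simp [hg, h1, h2]
    · have hg : pvG f = none := by rw [pvG, if_neg h1]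
      simp [hg, h1]

theorem pvFilterMap_filter (fs : List (List Char)) :
    (fs.filter (fun p => p.length > 0)).filterMap pvG = fs.filterMap pvG := by
  induction fs with
  | nil => rfl
  | cons f fs ih =>
    by_cases hf : f.length > 0
    · simp [List.filter_cons, hf, List.filterMap_cons, ih]
    · have hg : pvG f = none := by simp [pvG, hf]
      simp [List.filter_cons, hf, hg, ih]

theorem pvG_props (fs : List (List Char)) (h : ∀ p ∈ fs, '\t' ∉ p) :
    ∀ v ∈ fs.filterMap pvG, v ≠ [] ∧ '\t' ∉ v := by
  intro v hv
  obtain ⟨p, hp, hgp⟩ := List.mem_filterMap.mp hv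
  unfold pvG at hgp
  split_ifs at hgp with h1 h2 h3
  obtain rfl : PySem.Chars.slice p (some (PySem.Chars.find p [':'] + 1)) none = v :=
    Option.some.inj hgp
  refine ⟨?_, fun hvt => h p hp ?_⟩
  · exact List.ne_nil_of_length_pos h3
  · rw [PySem.Chars.slice_eq_listSlice, PySem.List.slice_some_none] at hvt
    exact List.mem_of_mem_drop hvt

def pvFS (L : String) : List (List Char) :=
  (pvSplitC (L.toList.map pvSub)).1 :: (pvSplitC (L.toList.map pvSub)).2

def pvVS (L : String) : List (List Char) := (pvFS L).filterMap pvG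

theorem pvMem_ic (vs : List (List Char)) (c : Char) (hc : c ∈ pvIc vs) :
    c = '\t' ∨ ∃ p ∈ vs, c ∈ p := by
  induction vs with
  | nil => simp [pvIc] at hc
  | cons v vs ih =>
    cases vs with
    | nil => exact Or.inr ⟨v, by simp, by simpa [pvIc] using hc⟩
    | cons w ws =>
      simp only [pvIc, List.mem_append, List.mem_cons] at hc
      rcases hc with h | h | h
      · exact Or.inr ⟨v, by simp, h⟩
      · exact Or.inl h
      · rcases ih h with h' | ⟨p, hp, hcp⟩
        · exact Or.inl h'
        · exact Or.inr ⟨p, by simp [hp], hcp⟩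

theorem pvFS_tab (L : String) : ∀ p ∈ pvFS L, '\t' ∉ p := by
  intro p hp
  obtain ⟨h1, h2⟩ := pvSplitC_no_tab (L.toList.map pvSub)
  rcases List.mem_cons.mp hp with rfl | h
  · exact h1
  · exact h2 p h

theorem pvNF_props (L : String) :
    ∀ p ∈ (pvFS L).filter (fun p => p.length > 0), p ≠ [] ∧ '\t' ∉ p := by
  intro p hp
  obtain ⟨hmem, hlen⟩ := List.mem_filter.mp hp
  exact ⟨List.ne_nil_of_length_pos (by simpa using hlen), pvFS_tab L p hmem⟩

theorem pvJD_eq (L : String) :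
    LTsv_joindatanum L 0 (some "") =
      String.ofList (pvIc ((pvFS L).filter (fun p => p.length > 0))) := by
  have h0 : ("" : String).toList = [] := rfl
  unfold LTsv_joindatanum
  simp only [pvReplace_eq, pvSplitOn_eq, h0, List.map_nil, List.length_nil, gt_iff_lt,
    lt_self_iff_false, if_false, List.append_nil, ite_self]
  rw [pvFoldA1]
  have hst := pvStripTab_flat _ (pvNF_props L)
  unfold pvFS at hst
  rw [List.nil_append, hst]
  rfl

theorem pvNL (L : String) :
    ∀ c ∈ pvIc ((pvFS L).filter (fun p => p.length > 0)), c ≠ '\n' := by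
  intro c hc
  have hmS : ∀ c ∈ L.toList.map pvSub, c ≠ '\n' := by
    intro c hc
    obtain ⟨c', _, rfl⟩ := List.mem_map.mp hc
    by_cases h : c' = '\n'
    · simp [pvSub, h]
    · simp [pvSub, h]
  rcases pvMem_ic _ c hc with rfl | ⟨p, hp, hcp⟩
  · decide
  · have hpf : p ∈ pvFS L := (List.mem_filter.mp hp).1
    obtain ⟨h1, h2⟩ := pvSplitC_mem (L.toList.map pvSub)
    rcases List.mem_cons.mp hpf with rfl | h
    · exact hmS c (h1 c hcp)
    · exact hmS c (h2 p h c hcp)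

theorem pvA_eq (L : String) : LTsv_unzipdata L = String.ofList (pvIc (pvVS L)) := by
  unfold LTsv_unzipdata
  rw [pvJD_eq]
  simp only [String.toList_ofList]
  rw [pvStrip_id _ (pvNL L)]
  have hvs : pvVS L = ((pvFS L).filter (fun p => p.length > 0)).filterMap pvG :=
    (pvFilterMap_filter _).symm
  cases hnf0 : (pvFS L).filter (fun p => p.length > 0) with
  | nil =>
    rw [hnf0] at hvs
    simp only [pvIc, pvSplitOn_eq, pvSplitC]
    rw [pvFoldA2]
    simp [show pvG [] = none from rfl, pvFlatR, hvs, pvIc]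
  | cons p ps =>
    rw [hnf0] at hvs
    rw [pvSplitOn_eq]
    rw [show (pvSplitC (pvIc (p :: ps))).1 :: (pvSplitC (pvIc (p :: ps))).2 = p :: ps from
      pvSplitC_ic _ (by simp) (fun q hq => ((hnf0 ▸ pvNF_props L) q hq).2)]
    rw [pvFoldA2, List.nil_append, ← hvs]
    rw [pvRstrip_flatR (pvVS L) (fun v hv => pvG_props (pvFS L) (pvFS_tab L) v hv)]

-- ---- B-side: the state machine over one field ----

-- state evolution inside a field (the two non-separator branches of pvStepB)
def pvStepF (st : Int × Bool × List Char) (c : Char) : Int × Bool × List Char :=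
  if ¬ st.2.1 then
    if c = ':' then (st.1, true, st.2.2)
    else (st.1 + 1, st.2.1, st.2.2)
  else (st.1, st.2.1, st.2.2 ++ [c])

def pvField (q : List Char) : Int × Bool × List Char := q.foldl pvStepF (0, false, [])

-- what pvStepB's separator branch emits from a field state
def pvFlush (st : Int × Bool × List Char) : Option (List Char) :=
  if st.2.1 ∧ st.1 > 0 ∧ st.2.2 ≠ [] then some st.2.2 else none

theorem pvStepB_sep (out : List (List Char)) (st : Int × Bool × List Char) (c : Char)
    (hc : c = '\t' ∨ c = '\n') :
    pvStepB (out, st) c = (out ++ (pvFlush st).toList, 0, false, []) := by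
  unfold pvStepB pvFlush
  rw [if_pos hc]
  by_cases h : st.2.1 ∧ st.1 > 0 ∧ st.2.2 ≠ [] <;> simp [h]

theorem pvStepB_field (out : List (List Char)) (st : Int × Bool × List Char) (c : Char)
    (h1 : c ≠ '\t') (h2 : c ≠ '\n') :
    pvStepB (out, st) c = (out, pvStepF st c) := by
  unfold pvStepB pvStepF
  rw [if_neg (by simp [h1, h2])]
  by_cases hs : st.2.1 <;> by_cases hc : c = ':' <;> simp [hs, hc]

theorem pvStepB_sub (st : List (List Char) × Int × Bool × List Char) (c : Char) :
    pvStepB st c = pvStepB st (pvSub c) := by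
  by_cases h : c = '\n'
  · subst h
    unfold pvStepB pvSub
    simp
  · simp [pvSub, h]

theorem pvFold_sub (s : List Char) : ∀ st,
    s.foldl pvStepB st = (s.map pvSub).foldl pvStepB st := by
  induction s with
  | nil => intro st; rfl
  | cons c r ih => intro st; simp only [List.foldl_cons, List.map_cons, ← pvStepB_sub, ih]

theorem pvField_snoc (q : List Char) (c : Char) :
    pvField (q ++ [c]) = pvStepF (pvField q) c := by
  simp [pvField]

-- first-colon decomposition of a field's final state
theorem pvField_char (q : List Char) :
    (':' ∉ q ∧ pvField q = ((q.length : Int), false, [])) ∨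
      (∃ a b, q = a ++ ':' :: b ∧ ':' ∉ a ∧ pvField q = ((a.length : Int), true, b)) := by
  induction q using List.reverseRecOn with
  | nil => exact Or.inl ⟨by simp, rfl⟩
  | append_singleton q c ih =>
    rcases ih with ⟨hnc, hst⟩ | ⟨a, b, rfl, hna, hst⟩
    · by_cases hc : c = ':'
      · subst hc
        exact Or.inr ⟨q, [], by simp, hnc, by simp [pvField_snoc, hst, pvStepF]⟩
      · refine Or.inl ⟨by simp [hnc]; exact fun h => hc h.symm, ?_⟩
        rw [pvField_snoc, hst]
        simp [pvStepF, hc]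
    · refine Or.inr ⟨a, b ++ [c], by simp, hna, ?_⟩
      rw [pvField_snoc, hst]
      simp [pvStepF]

-- find of a single ':' at the first-colon position
theorem pvFind_colon (a b : List Char) (hna : ':' ∉ a) :
    PySem.Chars.find (a ++ ':' :: b) [':'] = (a.length : Int) := by
  set s := a ++ ':' :: b with hs
  have hinf : [':'] <:+: s := ⟨a, b, by simp [hs]⟩
  have hnn : 0 ≤ PySem.Chars.find s [':'] := (PySem.Chars.find_nonneg_iff s [':']).mpr hinf
  obtain ⟨hpre, hmin⟩ := PySem.Chars.find_spec hnn
  have hdrop : s.drop a.length = ':' :: b := by simp [hs]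
  have hle : (PySem.Chars.find s [':']).toNat ≤ a.length := by
    by_contra hgt
    exact hmin a.length (by omega) ⟨b, by simp [hdrop]⟩
  have hge : (PySem.Chars.find s [':']).toNat = a.length := by
    rcases Nat.lt_or_ge (PySem.Chars.find s [':']).toNat a.length with hlt | hge'
    · exfalso
      obtain ⟨t, ht⟩ := hpre
      have hget : s[(PySem.Chars.find s [':']).toNat]? = some ':' := by
        have h0 : (List.drop (PySem.Chars.find s [':']).toNat s)[0]? = some ':' := by
          rw [← ht]; rfl
        rw [List.getElem?_drop] at h0
        simpa using h0
      rw [hs, List.getElem?_append_left hlt] at hget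
      exact hna (List.mem_of_getElem? hget)
    · omega
  omega

theorem pvFlush_eq_pvG (q : List Char) : pvFlush (pvField q) = pvG q := by
  rcases pvField_char q with ⟨hnc, hst⟩ | ⟨a, b, rfl, hna, hst⟩
  · rw [hst]
    have hfind : PySem.Chars.find q [':'] = -1 := by
      rw [PySem.Chars.find_eq_neg_one_iff]
      intro hinf
      exact hnc (by
        obtain ⟨u, v, huv⟩ := hinf
        simp [← huv])
    unfold pvFlush pvG
    rw [hfind]
    simp
  · rw [hst]
    have hfind := pvFind_colon a b hna
    have hdrop : (a ++ ':' :: b).drop (a.length + 1) = b := by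
      rw [show a.length + 1 = (a ++ [':']).length by simp]
      rw [show a ++ ':' :: b = (a ++ [':']) ++ b by simp]
      simp
    have hslice : PySem.Chars.slice (a ++ ':' :: b) (some ((a.length : Int) + 1)) none = b := by
      rw [PySem.Chars.slice_eq_listSlice,
        show ((a.length : Int) + 1) = ((a.length + 1 : Nat) : Int) by push_cast; ring,
        PySem.List.slice_from_natCast, hdrop]
    unfold pvFlush pvG
    rw [hfind, hslice]
    by_cases ha : a.length > 0
    · by_cases hb : b = []
      · subst hb; simp [ha]
      · simp [ha, hb, List.length_pos_iff.mpr hb,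
          show (0 : Int) < a.length by exact_mod_cast ha]
    · have ha0 : a.length = 0 := by omega
      simp [ha, show ¬ ((0:Int) < (a.length : Int)) by exact_mod_cast ha, ha0]

-- the scan over t followed by the sentinel separator emits the extracted values
theorem pvScan (t : List Char) : ∀ (q : List Char) (out : List (List Char)),
    '\n' ∉ t →
    ((t ++ ['\t']).foldl pvStepB (out, pvField q)).1
      = out ++ (pvG (q ++ (pvSplitC t).1)).toList ++ ((pvSplitC t).2).filterMap pvG := by
  induction t with
  | nil =>
    intro q out _
    simp only [List.nil_append, List.foldl_cons, List.foldl_nil]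
    rw [pvStepB_sep _ _ _ (Or.inl rfl), pvFlush_eq_pvG]
    simp [pvSplitC]
  | cons c r ih =>
    intro q out hnl
    simp only [List.mem_cons, not_or] at hnl
    by_cases hc : c = '\t'
    · subst hc
      simp only [List.cons_append, List.foldl_cons]
      rw [pvStepB_sep _ _ _ (Or.inl rfl), pvFlush_eq_pvG,
        show (0, false, ([] : List Char)) = pvField [] from rfl, ih [] _ hnl.2]
      simp only [pvSplitC, if_pos rfl, List.nil_append]
      cases hg : pvG ((pvSplitC r).1) <;>
        simp [List.filterMap_cons, hg]
    · simp only [List.cons_append, List.foldl_cons]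
      rw [pvStepB_field _ _ _ hc (fun h => hnl.1 h.symm), ← pvField_snoc, ih _ _ hnl.2]
      simp [pvSplitC, hc]

theorem pvB_eq (L : String) : LTsv_unzipdata_alt L = String.ofList (pvIc (pvVS L)) := by
  unfold LTsv_unzipdata_alt
  have hmap : (L.toList ++ ['\t']).foldl pvStepB ([], 0, false, [])
      = (L.toList.map pvSub ++ ['\t']).foldl pvStepB ([], 0, false, []) := by
    rw [List.foldl_append, List.foldl_append, pvFold_sub L.toList]
  have hnl : '\n' ∉ L.toList.map pvSub := by
    intro h
    obtain ⟨c, _, hc⟩ := List.mem_map.mp h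
    by_cases h' : c = '\n' <;> simp [pvSub, h'] at hc
  have hscan := pvScan (L.toList.map pvSub) [] [] hnl
  simp only [pvField, List.foldl_nil, List.nil_append] at hscan
  rw [hmap, hscan, pvJoin_eq_ic]
  congr 1
  unfold pvVS pvFS
  cases hg : pvG ((pvSplitC (L.toList.map pvSub)).1) <;>
    simp [List.filterMap_cons, hg]

theorem pvMainEq (L : String) : LTsv_unzipdata L = LTsv_unzipdata_alt L := by
  rw [pvA_eq, pvB_eq]

-- ===== VERDICT (by name: the statement is the Claim_ definition above) =====
theorem LTsv_unzipdata_spec : Claim_equal_LTsv_unzipdata := by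
  intro L _
  exact pvMainEq L
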